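-- pv_equiv track=rewrite | github.com/harry123180/project_ERP_dev_agent | backend/app/utils/security.py | _filter_sensitive_fields
-- ===== SOURCE A (Python) =====
-- from typing import Dict, List, Optional, Set, Any, Tuple
--
-- def _filter_sensitive_fields(item: Dict, user_roles: List[str]) -> Dict:
--     """Remove sensitive fields based on user roles"""
--     filtered_item = item.copy()
--
--     # Remove financial data for non-authorized users
--     if not any(role in ['Accountant', 'ProcurementMgr', 'Admin'] for role in user_roles):
--         sensitive_fields = ['unit_price', 'total_amount', 'budget', 'expenditure']
--         for field in sensitive_fields:
--             filtered_item.pop(field, None)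
--
--     # Remove personal data for non-admin users
--     if 'Admin' not in user_roles:
--         filtered_item.pop('password_hash', None)
--         filtered_item.pop('internal_notes', None)
--
--     return filtered_item
-- ===== SOURCE B (Python) =====
-- def _field_level(key):
--     """Static sensitivity level of a field: 0 public, 1 financial, 2 personal."""
--     if key in ('unit_price', 'total_amount', 'budget', 'expenditure'):
--         return 1
--     if key in ('password_hash', 'internal_notes'):
--         return 2
--     return 0
--
--
-- def _clearance(user_roles):
--     """Highest clearance granted by the roles: Admin=2, finance roles=1, others=0."""
--     c = 0
--     for role in user_roles:
--         c = max(c, 2 if role == 'Admin' else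
--                    1 if role in ('Accountant', 'ProcurementMgr') else 0)
--     return c
--
--
-- def _filter_sensitive_fields(item, user_roles):
--     """Remove sensitive fields based on user roles (clearance-level model)."""
--     c = _clearance(user_roles)
--     return {k: v for k, v in item.items() if _field_level(k) <= c}
-- ===== Notes on version B (the rewrite author's own statement) =====
-- stated objective: alternative
-- what changed: B replaces A's two conditional copy-and-pop passes over named keys by a numeric clearance model: each field has a static sensitivity level (0/1/2), the roles are folded to a single max clearance, and the dict is filtered once by the arithmetic test level(key) <= clearance.
import Mathlib
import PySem

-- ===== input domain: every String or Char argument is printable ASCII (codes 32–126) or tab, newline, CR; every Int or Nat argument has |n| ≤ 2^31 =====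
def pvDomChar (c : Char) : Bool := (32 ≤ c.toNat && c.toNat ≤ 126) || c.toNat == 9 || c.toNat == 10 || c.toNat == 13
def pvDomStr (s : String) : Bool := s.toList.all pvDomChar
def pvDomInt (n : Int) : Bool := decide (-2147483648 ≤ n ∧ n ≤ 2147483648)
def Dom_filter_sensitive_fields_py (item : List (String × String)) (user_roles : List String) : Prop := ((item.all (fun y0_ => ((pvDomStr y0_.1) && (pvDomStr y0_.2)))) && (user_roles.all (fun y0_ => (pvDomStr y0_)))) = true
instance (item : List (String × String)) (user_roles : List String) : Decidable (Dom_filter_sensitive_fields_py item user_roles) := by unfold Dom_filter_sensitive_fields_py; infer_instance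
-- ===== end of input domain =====

-- B replaces A's conditional copy-and-pop of named keys by a clearance-level model:
-- a static field-sensitivity table, a fold of the roles to a max clearance, and one
-- filter by the arithmetic test level(key) ≤ clearance (objective: alternative).


-- ===== PORT A =====
-- dict.pop(k, None) on the association-list model of a dict (unique keys): remove the
-- entries keyed k (exact for a Python dict, whose keys are unique).
def popKey (d : List (String × String)) (k : String) : List (String × String) :=
  d.filter (fun kv => kv.1 != k)

def filter_sensitive_fields_py (item : List (String × String)) (user_roles : List String) : List (String × String) :=
  -- filtered_item = item.copy(); conditionally pop the financial fields one by one
  let filtered₁ :=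
    if !(user_roles.any (fun role => ["Accountant", "ProcurementMgr", "Admin"].contains role)) then
      ["unit_price", "total_amount", "budget", "expenditure"].foldl popKey item
    else item
  -- then conditionally pop the two personal fields
  if !(user_roles.contains "Admin") then
    popKey (popKey filtered₁ "password_hash") "internal_notes"
  else filtered₁

-- ===== PORT B =====
-- static sensitivity level of a field: 0 public, 1 financial, 2 personal
def fieldLevel (k : String) : Nat :=
  if ["unit_price", "total_amount", "budget", "expenditure"].contains k then 1
  else if ["password_hash", "internal_notes"].contains k then 2
  else 0

-- per-role clearance granted, folded to the max as in _clearance's loop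
def roleLevel (r : String) : Nat :=
  if "Admin" == r then 2
  else if ["Accountant", "ProcurementMgr"].contains r then 1
  else 0

def clearance (user_roles : List String) : Nat :=
  user_roles.foldl (fun c role => max c (roleLevel role)) 0

def filter_sensitive_fields_py_alt (item : List (String × String)) (user_roles : List String) : List (String × String) :=
  let c := clearance user_roles
  item.filter (fun kv => decide (fieldLevel kv.1 ≤ c))

-- ===== PRECONDITION & SPEC =====
def Spec_filter_sensitive_fields_py (item : List (String × String)) (user_roles : List String) (out : List (String × String)) : Prop := out = filter_sensitive_fields_py_alt item user_roles
instance (item : List (String × String)) (user_roles : List String) (out : List (String × String)) : Decidable (Spec_filter_sensitive_fields_py item user_roles out) := by unfold Spec_filter_sensitive_fields_py; infer_instance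

-- ===== CLAIM (what is proved, stated in full; the proofs are below) =====
def Claim_equal_filter_sensitive_fields_py : Prop := ∀ (item : List (String × String)) (user_roles : List String), Dom_filter_sensitive_fields_py item user_roles → Spec_filter_sensitive_fields_py item user_roles (filter_sensitive_fields_py item user_roles)

-- ===== LEMMAS AND PROOFS =====

-- A's single role test split into the two tests B's clearance distinguishes
theorem any3_split (l : List String) :
    (l.any fun role => ["Accountant", "ProcurementMgr", "Admin"].contains role) =
      ((l.any fun r => ["Accountant", "ProcurementMgr"].contains r) || l.contains "Admin") := by
  rw [Bool.eq_iff_iff]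
  simp only [List.any_eq_true, Bool.or_eq_true, List.contains_iff_mem, List.mem_cons,
    List.not_mem_nil, or_false]
  constructor
  · rintro ⟨x, hx, (h | h | h)⟩
    · exact Or.inl ⟨x, hx, Or.inl h⟩
    · exact Or.inl ⟨x, hx, Or.inr h⟩
    · exact Or.inr (h ▸ hx)
  · rintro (⟨x, hx, (h | h)⟩ | h)
    · exact ⟨x, hx, Or.inl h⟩
    · exact ⟨x, hx, Or.inr (Or.inl h)⟩
    · exact ⟨"Admin", h, Or.inr (Or.inr rfl)⟩

-- the fold computing the clearance, characterised by the two role tests A makes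
theorem clearance_fold (user_roles : List String) (a : Nat) :
    user_roles.foldl (fun c role => max c (roleLevel role)) a =
      max a (if user_roles.contains "Admin" then 2
             else if user_roles.any (fun r => ["Accountant", "ProcurementMgr"].contains r) then 1
             else 0) := by
  induction user_roles generalizing a with
  | nil => simp
  | cons r rs ih =>
    rw [List.contains_cons, List.any_cons, List.foldl_cons, ih (max a (roleLevel r))]
    cases hA : ("Admin" == r) <;>
    cases hF : (["Accountant", "ProcurementMgr"].contains r) <;>
    cases hCA : (rs.contains "Admin") <;>
    cases hAny : (rs.any fun r => ["Accountant", "ProcurementMgr"].contains r) <;>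
      simp only [roleLevel, hA, hF, hCA, hAny, Bool.or_true, Bool.true_or, Bool.or_false,
        Bool.false_or, Bool.false_eq_true, Bool.true_eq_false, eq_self_iff_true,
        if_true, if_false, reduceIte] <;> omega

theorem filter_sensitive_fields_py_spec : Claim_equal_filter_sensitive_fields_py := by
  intro item user_roles _
  unfold Spec_filter_sensitive_fields_py filter_sensitive_fields_py filter_sensitive_fields_py_alt popKey clearance
  rw [clearance_fold]
  by_cases hA : (user_roles.contains "Admin") = true <;>
  by_cases hF : (user_roles.any (fun r => ["Accountant", "ProcurementMgr"].contains r)) = true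
  all_goals
    have h1 := any3_split user_roles
  all_goals
    simp only [h1, hA, hF, Bool.or_true, Bool.true_or, Bool.or_false, Bool.false_or,
      Bool.not_true, Bool.not_false, if_true, if_false, List.foldl,
      List.filter_filter, Nat.max_zero, Nat.zero_max]
  all_goals first
    | -- clearance 2 (Admin): nothing is dropped on either side
      (symm; apply List.filter_eq_self.mpr; intro kv _; obtain ⟨k, v⟩ := kv;
       simp only [decide_eq_true_eq]; unfold fieldLevel; split_ifs <;> omega)
    | -- clearance 1 / 0: pointwise comparison of the two keep-predicates
      (apply List.filter_congr; intro kv _; obtain ⟨k, v⟩ := kv;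
       by_cases e1 : k = "unit_price"
       · subst e1; rfl
       by_cases e2 : k = "total_amount"
       · subst e2; rfl
       by_cases e3 : k = "budget"
       · subst e3; rfl
       by_cases e4 : k = "expenditure"
       · subst e4; rfl
       by_cases e5 : k = "password_hash"
       · subst e5; rfl
       by_cases e6 : k = "internal_notes"
       · subst e6; rfl
       simp [fieldLevel, bne, e1, e2, e3, e4, e5, e6])
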